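-- pv_equiv track=rewrite | github.com/Mkvgb/cjh_study | com/code/sms_20201208.py | divideTextGsm7
-- ===== SOURCE A (Python) =====
-- GSM7_BASIC = ('@£$¥èéùìòÇ\nØø\rÅåΔ_ΦΓΛΩΠΨΣΘΞ\x1bÆæßÉ !\"#¤%&\'()*+,-./0123456789:;<=>?¡ABCDEFGHIJKLMNOPQRSTUVWXYZÄÖÑÜ`¿abcdefghijklmnopqrstuvwxyzäöñüà')
--
-- GSM7_EXTENDED = {chr(0xFF): 0x0A,
--                  # CR2: chr(0x0D),
--                  '^': chr(0x14),
--                  # SS2: chr(0x1B),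
--                  '{': chr(0x28),
--                  '}': chr(0x29),
--                  '\\': chr(0x2F),
--                  '[': chr(0x3C),
--                  '~': chr(0x3D),
--                  ']': chr(0x3E),
--                  '|': chr(0x40),
--                  '€': chr(0x65)}
--
-- MAX_MULTIPART_MESSAGE_LENGTH = {0x00: 153,  # GSM-7
--                                 0x04: 133,  # 8-bit
--                                 0x08: 67}  # UCS2
--
-- def divideTextGsm7(plainText):
--     result = []
--
--     plainStartPtr = 0
--     plainStopPtr = 0
--     chunkByteSize = 0
--
--     plainText = str(plainText)
--     while plainStopPtr < len(plainText):
--         char = plainText[plainStopPtr]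
--         idx = GSM7_BASIC.find(char)
--         if idx != -1:
--             chunkByteSize = chunkByteSize + 1;
--         elif char in GSM7_EXTENDED:
--             chunkByteSize = chunkByteSize + 2;
--         else:
--             raise ValueError('Cannot encode char "{0}" using GSM-7 encoding'.format(char))
--
--         plainStopPtr = plainStopPtr + 1
--         if chunkByteSize > MAX_MULTIPART_MESSAGE_LENGTH[0x00]:
--             plainStopPtr = plainStopPtr - 1
--
--         if chunkByteSize >= MAX_MULTIPART_MESSAGE_LENGTH[0x00]:
--             result.append(plainText[plainStartPtr:plainStopPtr])
--             plainStartPtr = plainStopPtr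
--             chunkByteSize = 0
--
--     if chunkByteSize > 0:
--         result.append(plainText[plainStartPtr:])
--
--     return result
-- ===== SOURCE B (Python) =====
-- GSM7_BASIC = ('@£$¥èéùìòÇ\nØø\rÅåΔ_ΦΓΛΩΠΨΣΘΞ\x1bÆæßÉ !\"#¤%&\'()*+,-./0123456789:;<=>?¡ABCDEFGHIJKLMNOPQRSTUVWXYZÄÖÑÜ`¿abcdefghijklmnopqrstuvwxyzäöñüà')
--
-- GSM7_EXTENDED = {chr(0xFF): 0x0A,
--                  '^': chr(0x14),
--                  '{': chr(0x28),
--                  '}': chr(0x29),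
--                  '\\': chr(0x2F),
--                  '[': chr(0x3C),
--                  '~': chr(0x3D),
--                  ']': chr(0x3E),
--                  '|': chr(0x40),
--                  '€': chr(0x65)}
--
-- MAX_MULTIPART_MESSAGE_LENGTH = {0x00: 153,  # GSM-7
--                                 0x04: 133,  # 8-bit
--                                 0x08: 67}  # UCS2
--
--
-- def _gsm7Cost(char):
--     if char in GSM7_BASIC:
--         return 1
--     if char in GSM7_EXTENDED:
--         return 2
--     raise ValueError('Cannot encode char "{0}" using GSM-7 encoding'.format(char))
--
--
-- def divideTextGsm7(plainText):
--     plainText = str(plainText)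
--     limit = MAX_MULTIPART_MESSAGE_LENGTH[0x00]
--     costs = [_gsm7Cost(char) for char in plainText]
--     n = len(plainText)
--     chunks = []
--     start = 0
--     while start < n:
--         # a chunk always holds its first character; extend while the budget allows
--         size = costs[start]
--         end = start + 1
--         while end < n and size + costs[end] <= limit:
--             size += costs[end]
--             end += 1
--         chunks.append(plainText[start:end])
--         start = end
--     return chunks
-- ===== Notes on version B (the rewrite author's own statement) =====
-- stated objective: simpler
-- what changed: B precomputes a per-character cost table and then emits maximal chunks with a nested start/end boundary scan ('extend while size+cost<=153'), replacing A's single-pointer loop with tentative advance, rollback and running-state flush arithmetic.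
import Mathlib
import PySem

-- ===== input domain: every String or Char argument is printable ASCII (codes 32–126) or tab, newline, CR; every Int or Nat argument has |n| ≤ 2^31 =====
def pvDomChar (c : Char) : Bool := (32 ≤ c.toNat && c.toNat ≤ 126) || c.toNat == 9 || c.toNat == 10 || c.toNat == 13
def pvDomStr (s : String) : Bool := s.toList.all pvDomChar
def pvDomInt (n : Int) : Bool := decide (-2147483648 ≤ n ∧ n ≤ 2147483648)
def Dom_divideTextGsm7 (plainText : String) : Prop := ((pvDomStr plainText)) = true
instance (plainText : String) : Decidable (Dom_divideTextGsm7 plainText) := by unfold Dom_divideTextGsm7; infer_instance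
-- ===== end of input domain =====

-- B replaces A's tentative-advance/rollback pointer loop by a precomputed cost table and a
-- nested maximal-chunk boundary scan (objective: a simpler decomposition, same cost).

-- GSM7_BASIC as a list of chars (module constant, shared by both ports and Pre_)
def pvGsm7Basic : List Char :=
  ['@', '£', '$', '¥', 'è', 'é', 'ù', 'ì', 'ò', 'Ç', '\x0a', 'Ø', 'ø', '\x0d', 'Å', 'å', 'Δ', '_',
   'Φ', 'Γ', 'Λ', 'Ω', 'Π', 'Ψ', 'Σ', 'Θ', 'Ξ', '\x1b', 'Æ', 'æ', 'ß', 'É', ' ', '!', '"', '#',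
   '¤', '%', '&', '\x27', '(', ')', '*', '+', ',', '-', '.', '/', '0', '1', '2', '3', '4', '5',
   '6', '7', '8', '9', ':', ';', '<', '=', '>', '?', '¡', 'A', 'B', 'C', 'D', 'E', 'F', 'G', 'H',
   'I', 'J', 'K', 'L', 'M', 'N', 'O', 'P', 'Q', 'R', 'S', 'T', 'U', 'V', 'W', 'X', 'Y', 'Z', 'Ä',
   'Ö', 'Ñ', 'Ü', '`', '¿', 'a', 'b', 'c', 'd', 'e', 'f', 'g', 'h', 'i', 'j', 'k', 'l', 'm', 'n',
   'o', 'p', 'q', 'r', 's', 't', 'u', 'v', 'w', 'x', 'y', 'z', 'ä', 'ö', 'ñ', 'ü', 'à']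

-- the keys of GSM7_EXTENDED (the values are never read: only key membership matters)
def pvGsm7ExtKeys : List Char := ['ÿ', '^', '{', '}', '\x5c', '[', '~', ']', '|', '€']

-- ===== PORT A =====
-- A's while loop, step for step; fuel only totalises the non-monotone stop pointer (2*len+1 is
-- enough, proved in the main lemma).  'GSM7_BASIC.find(char) != -1' on a single char is exactly
-- membership; 'str(plainText)' is the identity on a str; 'size > MAX…' is '153 < size'.
def divideTextGsm7Loop (cs : List Char) (res : List String) (start stop size fuel : Nat) :
    List String :=
  match fuel with
  | 0 => res
  | fuel + 1 =>
    if h : stop < cs.length then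
      match (if pvGsm7Basic.contains cs[stop] then some (size + 1)
             else if pvGsm7ExtKeys.contains cs[stop] then some (size + 2)
             else none : Option Nat) with
      | none => res                    -- Python: raise ValueError (excluded by Pre_)
      | some size' =>
        -- plainStopPtr += 1, rolled back when size' > 153; then the flush test
        if 153 ≤ size' then
          divideTextGsm7Loop cs
            (res ++ [String.ofList (PySem.List.slice cs (some (start : Int))
                (some (((if 153 < size' then stop + 1 - 1 else stop + 1) : Nat) : Int)))])
            (if 153 < size' then stop + 1 - 1 else stop + 1)
            (if 153 < size' then stop + 1 - 1 else stop + 1) 0 fuel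
        else
          divideTextGsm7Loop cs res start
            (if 153 < size' then stop + 1 - 1 else stop + 1) size' fuel
    else
      if 0 < size then
        res ++ [String.ofList (PySem.List.slice cs (some (start : Int)) none)]
      else res

def divideTextGsm7 (plainText : String) : List String :=
  divideTextGsm7Loop plainText.toList [] 0 0 0 (2 * plainText.toList.length + 1)

-- ===== PORT B =====
-- cost of one char; none = the ValueError Source B raises inside the comprehension
def pvBCost? (char : Char) : Option Nat :=
  if pvGsm7Basic.contains char then some 1
  else if pvGsm7ExtKeys.contains char then some 2
  else none

-- [ _gsm7Cost(char) for char in plainText ], aborting at the first invalid char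
def pvBCosts? : List Char → Option (List Nat)
  | [] => some []
  | c :: rest =>
    match pvBCost? c with
    | none => none
    | some k =>
      match pvBCosts? rest with
      | none => none
      | some ks => some (k :: ks)

-- Source B's inner loop: extend end while the budget allows.  The fuel argument only totalises
-- the while loop: e grows by 1 per iteration, so n - e iterations are enough.
def pvBInner (costs : List Nat) (n : Nat) : Nat → Nat → Nat → Nat
  | 0, e, _ => e
  | fuel + 1, e, size =>
    if e < n ∧ size + costs.getD e 0 ≤ 153 then
      pvBInner costs n fuel (e + 1) (size + costs.getD e 0)
    else e

-- Source B's outer loop: one chunk per iteration (a chunk always holds its first char, so start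
-- strictly grows and cs.length + 1 rounds of fuel are enough)
def pvBOuter (costs : List Nat) (cs : List Char) : Nat → Nat → List String
  | 0, _ => []
  | fuel + 1, start =>
    if start < cs.length then
      String.ofList (PySem.List.slice cs (some (start : Int))
          (some ((pvBInner costs cs.length (cs.length - (start + 1)) (start + 1)
              (costs.getD start 0) : Nat) : Int)))
        :: pvBOuter costs cs fuel
            (pvBInner costs cs.length (cs.length - (start + 1)) (start + 1) (costs.getD start 0))
    else []

def divideTextGsm7_alt (plainText : String) : List String :=
  match pvBCosts? plainText.toList with
  | none => []                         -- Python: raise ValueError (excluded by Pre_)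
  | some costs => pvBOuter costs plainText.toList (plainText.toList.length + 1) 0

-- ===== PRECONDITION & SPEC =====
-- Pre_ excludes exactly the inputs on which A raises ValueError: a char neither in the GSM-7
-- basic set nor an extended-table key (inside Dom that is exactly the tab character).
def Pre_divideTextGsm7 (plainText : String) : Prop :=
  (plainText.toList.all fun c => pvGsm7Basic.contains c || pvGsm7ExtKeys.contains c) = true

instance (plainText : String) : Decidable (Pre_divideTextGsm7 plainText) := by
  unfold Pre_divideTextGsm7; infer_instance

def pvWitness_divideTextGsm7 : String := "Hello SMS [world]!"

def Spec_divideTextGsm7 (plainText : String) (out : List String) : Prop :=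
  out = divideTextGsm7_alt plainText
instance (plainText : String) (out : List String) : Decidable (Spec_divideTextGsm7 plainText out) := by
  unfold Spec_divideTextGsm7; infer_instance

-- ===== CLAIM (what is proved, stated in full; the proofs are below) =====
def Claim_equal_divideTextGsm7 : Prop := ∀ (plainText : String), Dom_divideTextGsm7 plainText → Pre_divideTextGsm7 plainText → Spec_divideTextGsm7 plainText (divideTextGsm7 plainText)

-- ===== LEMMAS AND PROOFS =====

-- the cost of a valid char (proof-side view of pvBCost?)
def pvCostOf (c : Char) : Nat :=
  if pvGsm7Basic.contains c then 1 else if pvGsm7ExtKeys.contains c then 2 else 0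

theorem pvCostOf_le_two (c : Char) : pvCostOf c ≤ 2 := by
  unfold pvCostOf; split_ifs <;> omega

theorem pvCostOf_pos (c : Char) (h : c ∈ pvGsm7Basic ∨ c ∈ pvGsm7ExtKeys) : 1 ≤ pvCostOf c := by
  unfold pvCostOf
  rcases h with h | h
  · simp [h]
  · by_cases hb : c ∈ pvGsm7Basic <;> simp [hb, h]

theorem pvCosts_getD (cs : List Char) (i : Nat) (h : i < cs.length) :
    (cs.map pvCostOf).getD i 0 = pvCostOf cs[i] := by
  simp [List.getD_eq_getElem?_getD, List.getElem?_map, List.getElem?_eq_getElem h]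

theorem pvBCosts?_eq_map (cs : List Char)
    (hv : ∀ c ∈ cs, c ∈ pvGsm7Basic ∨ c ∈ pvGsm7ExtKeys) :
    pvBCosts? cs = some (cs.map pvCostOf) := by
  induction cs with
  | nil => rfl
  | cons c rest ih =>
    have hc := hv c (by simp)
    have hrest := ih (fun x hx => hv x (by simp [hx]))
    simp only [pvBCosts?, hrest, List.map_cons]
    unfold pvBCost? pvCostOf
    rcases hc with h | h
    · simp [h]
    · by_cases hb : c ∈ pvGsm7Basic <;> simp [hb, h]

-- unbounded version of pvBInner, for the proofs
def pvScan (costs : List Nat) (n e size : Nat) : Nat :=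
  if _h : e < n ∧ size + costs.getD e 0 ≤ 153 then
    pvScan costs n (e + 1) (size + costs.getD e 0)
  else e
termination_by n - e
decreasing_by omega

theorem pvScan_ge (costs : List Nat) (n e size : Nat) : e ≤ pvScan costs n e size := by
  fun_induction pvScan costs n e size with
  | case1 => omega
  | case2 => omega

theorem pvScan_step (costs : List Nat) (n e size : Nat)
    (h1 : e < n) (h2 : size + costs.getD e 0 ≤ 153) :
    pvScan costs n e size = pvScan costs n (e + 1) (size + costs.getD e 0) := by
  rw [pvScan, dif_pos ⟨h1, h2⟩]

theorem pvScan_eq (costs : List Nat) (n e size : Nat)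
    (h : ¬(e < n ∧ size + costs.getD e 0 ≤ 153)) :
    pvScan costs n e size = e := by
  rw [pvScan, dif_neg h]

theorem pvBInner_eq_scan (costs : List Nat) (n : Nat) :
    ∀ fuel e size, n - e ≤ fuel → pvBInner costs n fuel e size = pvScan costs n e size := by
  intro fuel
  induction fuel with
  | zero =>
    intro e size hf
    rw [pvScan_eq _ _ _ _ (by omega)]
    rfl
  | succ fuel ih =>
    intro e size hf
    by_cases h : e < n ∧ size + costs.getD e 0 ≤ 153
    · rw [pvScan, dif_pos h]
      show (if e < n ∧ size + costs.getD e 0 ≤ 153 then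
          pvBInner costs n fuel (e + 1) (size + costs.getD e 0) else e) = _
      rw [if_pos h]
      exact ih (e + 1) _ (by omega)
    · rw [pvScan_eq _ _ _ _ h]
      show (if e < n ∧ size + costs.getD e 0 ≤ 153 then
          pvBInner costs n fuel (e + 1) (size + costs.getD e 0) else e) = e
      rw [if_neg h]

-- unbounded version of pvBOuter, for the proofs
def pvChunks (costs : List Nat) (cs : List Char) (start : Nat) : List String :=
  if h : start < cs.length then
    String.ofList (PySem.List.slice cs (some (start : Int))
        (some ((pvScan costs cs.length (start + 1) (costs.getD start 0) : Nat) : Int)))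
      :: pvChunks costs cs (pvScan costs cs.length (start + 1) (costs.getD start 0))
  else []
termination_by cs.length - start
decreasing_by
  have := pvScan_ge costs cs.length (start + 1) (costs.getD start 0)
  omega

theorem pvBOuter_eq_chunks (costs : List Nat) (cs : List Char) :
    ∀ fuel start, cs.length + 1 - start ≤ fuel →
      pvBOuter costs cs fuel start = pvChunks costs cs start := by
  intro fuel
  induction fuel with
  | zero =>
    intro start hf
    rw [pvChunks, dif_neg (by omega)]
    rfl
  | succ fuel ih =>
    intro start hf
    by_cases h : start < cs.length
    · rw [pvChunks, dif_pos h]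
      show (if start < cs.length then _ :: pvBOuter costs cs fuel _ else []) = _
      rw [if_pos h]
      rw [pvBInner_eq_scan _ _ _ _ _ (by omega)]
      have hge := pvScan_ge costs cs.length (start + 1) (costs.getD start 0)
      rw [ih (pvScan costs cs.length (start + 1) (costs.getD start 0)) (by omega)]
    · rw [pvChunks, dif_neg h]
      show (if start < cs.length then _ :: pvBOuter costs cs fuel _ else []) = []
      rw [if_neg h]

-- the suffix of B's output that A's loop state (start, stop, size) still has to produce
def pvBRest (costs : List Nat) (cs : List Char) (start stop size : Nat) : List String :=
  if start = cs.length then []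
  else
    String.ofList (PySem.List.slice cs (some (start : Int))
        (some ((pvScan costs cs.length stop size : Nat) : Int)))
      :: pvChunks costs cs (pvScan costs cs.length stop size)

theorem pvBRest_start (costs : List Nat) (cs : List Char) (start : Nat)
    (hle : start ≤ cs.length)
    (hk : ∀ i, i < cs.length → costs.getD i 0 ≤ 2) :
    pvBRest costs cs start start 0 = pvChunks costs cs start := by
  by_cases hlt : start < cs.length
  · have hne : ¬ start = cs.length := by omega
    have hstep := pvScan_step costs cs.length start 0 hlt (by have := hk start hlt; omega)
    conv_rhs => rw [pvChunks]
    unfold pvBRest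
    rw [if_neg hne, dif_pos hlt, hstep, Nat.zero_add]
  · have h : start = cs.length := by omega
    unfold pvBRest
    rw [if_pos h, pvChunks, dif_neg hlt]

theorem pvLoop_eq_bRest (cs : List Char)
    (hv : ∀ c ∈ cs, c ∈ pvGsm7Basic ∨ c ∈ pvGsm7ExtKeys) :
    ∀ fuel start stop size res,
      start ≤ stop → stop ≤ cs.length → size ≤ 152 → (size = 0 ↔ start = stop) →
      2 * (cs.length - stop) + (if size = 0 then 0 else 1) ≤ fuel →
      divideTextGsm7Loop cs res start stop size fuel =
        res ++ pvBRest (cs.map pvCostOf) cs start stop size := by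
  have hpos : ∀ i, i < cs.length → 1 ≤ (cs.map pvCostOf).getD i 0 := by
    intro i hi
    rw [pvCosts_getD cs i hi]
    exact pvCostOf_pos _ (hv _ (List.getElem_mem hi))
  have hkle : ∀ i, i < cs.length → (cs.map pvCostOf).getD i 0 ≤ 2 := by
    intro i hi
    rw [pvCosts_getD cs i hi]
    exact pvCostOf_le_two _
  intro fuel
  induction fuel with
  | zero =>
    intro start stop size res hss hsn hsz hiff hfuel
    have hs0 : size = 0 := by
      by_cases h : size = 0
      · exact h
      · rw [if_neg h] at hfuel; omega
    have hstop : stop = cs.length := by rw [if_pos hs0] at hfuel; omega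
    have hstart : start = cs.length := by rw [hiff.mp hs0]; exact hstop
    simp only [divideTextGsm7Loop]
    unfold pvBRest
    rw [if_pos hstart, List.append_nil]
  | succ fuel ih =>
    intro start stop size res hss hsn hsz hiff hfuel
    by_cases hlt : stop < cs.length
    · have hvc := hv _ (List.getElem_mem hlt)
      have hgetD := pvCosts_getD cs stop hlt
      have hne : ¬ start = cs.length := by omega
      obtain ⟨k, hk1, hk2, hcost, hmatch⟩ :
          ∃ k, 1 ≤ k ∧ k ≤ 2 ∧ pvCostOf cs[stop] = k ∧
            (if pvGsm7Basic.contains cs[stop] then some (size + 1)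
             else if pvGsm7ExtKeys.contains cs[stop] then some (size + 2)
             else none : Option Nat) = some (size + k) := by
        by_cases hb : cs[stop] ∈ pvGsm7Basic
        · exact ⟨1, by omega, by omega, by simp [pvCostOf, hb], by simp [hb]⟩
        · rcases hvc with h | h
          · exact absurd h hb
          · exact ⟨2, by omega, by omega, by simp [pvCostOf, hb, h], by simp [hb, h]⟩
      simp only [divideTextGsm7Loop]
      rw [dif_pos hlt, hmatch]
      show (if 153 ≤ size + k then
          divideTextGsm7Loop cs
            (res ++ [String.ofList (PySem.List.slice cs (some (start : Int))
                (some (((if 153 < size + k then stop + 1 - 1 else stop + 1) : Nat) : Int)))])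
            (if 153 < size + k then stop + 1 - 1 else stop + 1)
            (if 153 < size + k then stop + 1 - 1 else stop + 1) 0 fuel
        else
          divideTextGsm7Loop cs res start
            (if 153 < size + k then stop + 1 - 1 else stop + 1) (size + k) fuel)
        = res ++ pvBRest (cs.map pvCostOf) cs start stop size
      by_cases hflush : 153 ≤ size + k
      · rw [if_pos hflush]
        by_cases hroll : 153 < size + k
        · -- rollback flush: k = 2, size = 152, the chunk ends before cs[stop]
          have hsz152 : size = 152 := by omega
          rw [if_pos hroll]
          have hred : stop + 1 - 1 = stop := by omega
          rw [hred]
          rw [if_neg (by omega : ¬ size = 0)] at hfuel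
          rw [ih stop stop 0 _ (Nat.le_refl _) (Nat.le_of_lt hlt) (by omega) (by simp)
              (by simp; omega)]
          rw [pvBRest_start _ _ _ (Nat.le_of_lt hlt) hkle]
          unfold pvBRest
          rw [if_neg hne]
          rw [pvScan_eq _ _ _ _ (by rw [hgetD, hcost]; omega)]
          simp
        · -- exact flush at 153: the chunk ends just after cs[stop]
          have h153 : size + k = 153 := by omega
          rw [if_neg hroll]
          rw [ih (stop + 1) (stop + 1) 0 _ (Nat.le_refl _) hlt (by omega) (by simp)
              (by simp; omega)]
          rw [pvBRest_start _ _ _ hlt hkle]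
          unfold pvBRest
          rw [if_neg hne]
          rw [pvScan_step _ _ _ _ hlt (by rw [hgetD, hcost]; omega), hgetD, hcost, h153]
          rw [pvScan_eq _ _ _ _ (by
            intro hcon
            have := hpos _ hcon.1
            omega)]
          simp
      · -- no flush: continue scanning with size + k
        rw [if_neg hflush, if_neg (by omega)]
        rw [ih start (stop + 1) (size + k) _ (by omega) hlt (by omega)
            (by constructor <;> intro h <;> omega) (by
              rw [if_neg (by omega : ¬ size + k = 0)]
              by_cases h0 : size = 0
              · rw [if_pos h0] at hfuel; omega
              · rw [if_neg h0] at hfuel; omega)]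
        unfold pvBRest
        rw [if_neg hne, if_neg hne]
        rw [pvScan_step _ _ stop size hlt (by rw [hgetD, hcost]; omega), hgetD, hcost]
    · -- stop = len: the loop ends; the tail chunk is appended iff size > 0
      have hstop : stop = cs.length := by omega
      simp only [divideTextGsm7Loop]
      rw [dif_neg hlt]
      by_cases hs0 : size = 0
      · have hstart : start = cs.length := by rw [hiff.mp hs0]; exact hstop
        rw [if_neg (by omega)]
        unfold pvBRest
        rw [if_pos hstart, List.append_nil]
      · have hstart : start < cs.length := by
          have := hiff.mpr
          rcases Nat.lt_or_ge start cs.length with h | h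
          · exact h
          · have : start = stop := by omega
            exact absurd (hiff.mpr this) hs0
        rw [if_pos (by omega)]
        unfold pvBRest
        rw [if_neg (by omega)]
        rw [pvScan_eq _ _ _ _ (by omega)]
        rw [pvChunks, dif_neg (by omega)]
        rw [PySem.List.slice_natCast, PySem.List.slice_from_natCast]
        rw [List.take_of_length_le (by simp; omega)]

theorem divideTextGsm7_spec' (plainText : String)
    (hpre : Pre_divideTextGsm7 plainText) :
    divideTextGsm7 plainText = divideTextGsm7_alt plainText := by
  have hv : ∀ c ∈ plainText.toList, c ∈ pvGsm7Basic ∨ c ∈ pvGsm7ExtKeys := by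
    intro c hc
    simpa using (List.all_eq_true.mp hpre) c hc
  unfold divideTextGsm7 divideTextGsm7_alt
  rw [pvBCosts?_eq_map _ hv]
  rw [pvLoop_eq_bRest plainText.toList hv (2 * plainText.toList.length + 1) 0 0 0 []
      (Nat.le_refl 0) (Nat.zero_le _) (by omega) (by simp) (by simp)]
  simp only [List.nil_append]
  rw [pvBOuter_eq_chunks _ _ _ _ (by omega)]
  exact pvBRest_start _ _ 0 (Nat.zero_le _)
    (fun i hi => by rw [pvCosts_getD _ i hi]; exact pvCostOf_le_two _)

-- ===== VERDICT (by name: the statement is the Claim_ definition above) =====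
theorem divideTextGsm7_spec : Claim_equal_divideTextGsm7 := by
  intro p _ hpre
  exact divideTextGsm7_spec' p hpre
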